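-- pv_equiv track=rewrite | github.com/kaetojn/Website | PFW/Assignment 1/Tour.py | index_of_M
-- ===== SOURCE A (Python) =====
-- def minimum_M(n: int):
--
--     M = []
--     if n > 1:
--         for i in range(1, n):
--             m = 2 * minimum_M(n - i) + 2 ** i - 1
--             M.append(m)
--     else:
--         m = 1
--         M.append(m)
--
--     return min(M)
--
-- def index_of_M(n: int):
--
--     M = []
--     if n > 1:
--         for i in range(1, n):
--             m = 2 * minimum_M(n - i) + 2 ** i - 1
--             M.append(m)
--     else:
--         return 0
--
--     return M.index(min(M)) + 1
-- ===== SOURCE B (Python) =====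
-- def scan_min(rev, k):
--     # one fused pass i = 1..k-1: incremental power p = 2**i, running first-argmin
--     best, besti, p = None, 0, 1
--     for i in range(1, k):
--         p += p
--         c = 2 * rev[i - 1] + p - 1
--         if best is None or c < best:
--             best, besti = c, i
--     return best, besti, p
--
--
-- def index_of_M(n: int):
--     if n <= 1:
--         return 0
--     # rev[j] == minimum_M(k - 1 - j) while processing stage k (newest value at the front)
--     rev = [1]
--     for k in range(2, n):
--         rev = [scan_min(rev, k)[0]] + rev
--     return scan_min(rev, n)[1]
-- ===== Notes on version B (the rewrite author's own statement) =====
-- stated objective: alternative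
-- what changed: Replaces A's exponential minimum_M recursion plus a separate min()/list.index() pass with a bottom-up table kept newest-first and a single fused scan that tracks the running first-argmin and an incremental power of two.
-- outside the precondition, e.g. on index_of_M(998): A does not finish within the time limit, B returns 44; on index_of_M(1000): A does not finish within the time limit, B returns 44
import Mathlib
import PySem

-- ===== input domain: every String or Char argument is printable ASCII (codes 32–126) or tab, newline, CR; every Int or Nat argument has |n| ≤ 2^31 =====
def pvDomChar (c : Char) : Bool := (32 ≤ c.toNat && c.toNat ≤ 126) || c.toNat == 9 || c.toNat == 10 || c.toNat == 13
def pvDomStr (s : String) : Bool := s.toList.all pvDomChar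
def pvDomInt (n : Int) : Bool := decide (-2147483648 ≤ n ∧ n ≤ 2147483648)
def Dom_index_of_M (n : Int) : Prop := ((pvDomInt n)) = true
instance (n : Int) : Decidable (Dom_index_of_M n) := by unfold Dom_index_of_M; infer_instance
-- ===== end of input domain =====

-- B replaces A's exponential minimum_M recursion plus the separate min()/index() pass with a
-- bottom-up table kept newest-first and one fused running-argmin scan (objective: alternative).

-- ===== PORT A =====
-- helper minimum_M: literal port of A's recursive minimum_M (2 ** i ported as 2 ^ i.toNat,
-- exact since i ≥ 1 on every call; min(M) on the always-nonempty M via PySem.List.min?)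
def minimum_M (n : Int) : Int :=
  if h : n > 1 then
    (PySem.List.min?
      ((PySem.List.pyRange 1 n).attach.map
        (fun p => 2 * minimum_M (n - p.1) + 2 ^ p.1.toNat - 1))
      (fun x => x)).getD 0
  else
    (PySem.List.min? [(1 : Int)] (fun x => x)).getD 0
termination_by n.toNat
decreasing_by
  have hi := p.2; rw [PySem.List.mem_pyRange_one] at hi; omega

def index_of_M (n : Int) : Int :=
  if n > 1 then
    let M := (PySem.List.pyRange 1 n).map
      (fun i => 2 * minimum_M (n - i) + 2 ^ i.toNat - 1)
    match PySem.List.index? M ((PySem.List.min? M (fun x => x)).getD 0) with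
    | some j => (j : Int) + 1
    | none => 0    -- unreachable: min(M) ∈ M
  else 0

-- ===== PORT B =====
-- scan_min of Source B: one fused loop carrying (best : Option Int, besti, p) with p the
-- incremental power 2 ** i; rev[i-1] is ported as pyGetD (exact: the index is in range)
def scanStep (rev : List Int) (st : Option Int × Int × Int) (i : Int) :
    Option Int × Int × Int :=
  let p := st.2.2 + st.2.2
  let c := 2 * PySem.List.pyGetD rev (i - 1) 0 + p - 1
  match st.1 with
  | none => (some c, i, p)
  | some b => if c < b then (some c, i, p) else (some b, st.2.1, p)

def scan_min (rev : List Int) (k : Int) : Option Int × Int × Int :=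
  (PySem.List.pyRange 1 k).foldl (scanStep rev) (none, 0, 1)

def index_of_M_alt (n : Int) : Int :=
  if n ≤ 1 then 0
  else
    let rev := (PySem.List.pyRange 2 n).foldl
      (fun rev k => ((scan_min rev k).1.getD 0) :: rev) [1]
    (scan_min rev n).2.1

-- ===== PRECONDITION & SPEC =====
-- Pre_ excludes n ≥ 998, where Python A never returns a value: the recursion
-- minimum_M(n-1) → minimum_M(n-2) → … reaches CPython's recursion limit there
-- (RecursionError) or exceeds any time budget; A returns on no input with n ≥ 998.
def Pre_index_of_M (n : Int) : Prop := n < 998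
instance (n : Int) : Decidable (Pre_index_of_M n) := by unfold Pre_index_of_M; infer_instance
def pvWitness_index_of_M : Int := 5

def Spec_index_of_M (n : Int) (out : Int) : Prop := out = index_of_M_alt n
instance (n : Int) (out : Int) : Decidable (Spec_index_of_M n out) := by unfold Spec_index_of_M; infer_instance

-- ===== CLAIM (what is proved, stated in full; the proofs are below) =====
def Claim_equal_index_of_M : Prop := ∀ (n : Int), Dom_index_of_M n → Pre_index_of_M n → Spec_index_of_M n (index_of_M n)

-- ===== LEMMAS AND PROOFS =====

-- A's candidate list at stage k, expressed through B's newest-first table rev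
def candsOf (rev : List Int) (k : Int) : List Int :=
  (PySem.List.pyRange 1 k).map
    (fun i => 2 * PySem.List.pyGetD rev (i - 1) 0 + 2 ^ i.toNat - 1)

-- the table invariant: rev holds minimum_M(k-1), …, minimum_M(1), newest first
def InvTable (rev : List Int) (k : Int) : Prop :=
  ∀ i : Int, 1 ≤ i → i < k → PySem.List.pyGetD rev (i - 1) 0 = minimum_M (k - i)

lemma minimum_M_le (n : Int) (h : ¬ n > 1) : minimum_M n = 1 := by
  rw [minimum_M]; simp [h]; decide

lemma minimum_M_gt (n : Int) (h : n > 1) :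
    minimum_M n = (PySem.List.min?
      ((PySem.List.pyRange 1 n).map
        (fun i => 2 * minimum_M (n - i) + 2 ^ i.toNat - 1))
      (fun x => x)).getD 0 := by
  rw [minimum_M]; simp [h, List.map_subtype, List.unattach_attach]

lemma candsOf_eq (rev : List Int) (k : Int) (hinv : InvTable rev k) :
    candsOf rev k = (PySem.List.pyRange 1 k).map
      (fun i => 2 * minimum_M (k - i) + 2 ^ i.toNat - 1) := by
  apply List.map_congr_left
  intro i hi
  rw [PySem.List.mem_pyRange_one] at hi
  rw [hinv i hi.1 hi.2]

-- the fused scan computes: the minimum of candsOf, its FIRST index + 1, and 2^(k-1)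
lemma scan_min_spec (rev : List Int) (k : Int) (hk : 2 ≤ k) :
    ∃ (m : Int) (j : Nat),
      PySem.List.min? (candsOf rev k) (fun x => x) = some m ∧
      PySem.List.index? (candsOf rev k) m = some j ∧
      scan_min rev k = (some m, (j : Int) + 1, 2 ^ (k - 1).toNat) := by
  induction k, hk using Int.le_induction with
  | base =>
      have hr : PySem.List.pyRange 1 2 = [1] := by decide
      refine ⟨2 * PySem.List.pyGetD rev 0 0 + 1, 0, ?_, ?_, ?_⟩
      · simp [candsOf, hr, PySem.List.min?_id_cons]
        omega
      · simp [candsOf, hr]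
        omega
      · simp [scan_min, hr, scanStep]
        omega
  | succ k hk ih =>
      obtain ⟨m, j, hmin, hidx, hstate⟩ := ih
      have hk1 : (1 : Int) ≤ k := by omega
      have hrange : PySem.List.pyRange 1 (k + 1) = PySem.List.pyRange 1 k ++ [k] :=
        PySem.List.pyRange_one_succ_right hk1
      have hpow : (2 : Int) ^ (k - 1).toNat + 2 ^ (k - 1).toNat = 2 ^ k.toNat := by
        have hkn : k.toNat = (k - 1).toNat + 1 := by omega
        rw [hkn, pow_succ]; ring
      set c : Int := 2 * PySem.List.pyGetD rev (k - 1) 0 + 2 ^ k.toNat - 1 with hc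
      have hcands : candsOf rev (k + 1) = candsOf rev k ++ [c] := by
        simp only [candsOf, hrange, List.map_append, List.map_cons, List.map_nil]
        rw [hc]
      have hstep : scan_min rev (k + 1) = scanStep rev (scan_min rev k) k := by
        simp [scan_min, hrange]
      have hscan : scanStep rev (scan_min rev k) k
          = if c < m then (some c, k, 2 ^ k.toNat) else (some m, (j : Int) + 1, 2 ^ k.toNat) := by
        rw [hstate]
        show (if c' : _ then _ else _ : Option Int × Int × Int) = _
        simp only [hpow]
        rfl
      obtain ⟨x, t, hxt⟩ : ∃ x t, candsOf rev k = x :: t := by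
        cases hcl : candsOf rev k with
        | nil =>
            rw [hcl] at hmin; simp [PySem.List.min?] at hmin
        | cons x t => exact ⟨x, t, rfl⟩
      have hm_fold : t.foldl min x = m := by
        have h2 := hmin
        rw [hxt, PySem.List.min?_id_cons] at h2
        exact Option.some.inj h2
      have hmin' : PySem.List.min? (candsOf rev (k + 1)) (fun x => x)
          = some (min m c) := by
        rw [hcands, hxt]
        show PySem.List.min? (x :: (t ++ [c])) (fun x => x) = some (min m c)
        rw [PySem.List.min?_id_cons, List.foldl_append]
        simp [hm_fold]
      have hmmem : m ∈ candsOf rev k := PySem.List.min?_mem hmin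
      have hmle : ∀ y ∈ candsOf rev k, m ≤ y := by
        intro y hy; exact PySem.List.min?_isMin hmin y hy
      have hlen : (candsOf rev k).length = (k - 1).toNat := by
        simp [candsOf, PySem.List.pyRange_of_pos 1 k (by norm_num : (0:Int) < 1),
          if_pos (show (1:Int) < k by omega)]
      by_cases hlt : c < m
      · have hnotmem : c ∉ candsOf rev k := fun hcm => absurd (hmle c hcm) (by omega)
        refine ⟨c, (candsOf rev k).length, ?_, ?_, ?_⟩
        · rw [hmin']; congr 1; omega
        · rw [hcands]
          exact PySem.List.index?_append_singleton_self _ c hnotmem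
        · rw [hstep, hscan, if_pos hlt, hlen]
          congr 1
          · simp
            omega
      · refine ⟨m, j, ?_, ?_, ?_⟩
        · rw [hmin']; congr 1; omega
        · rw [hcands, PySem.List.index?_append_of_mem [c] hmmem]; exact hidx
        · rw [hstep, hscan, if_neg hlt]
          norm_num

-- B's table after the outer loop satisfies the invariant at stage n
lemma table_inv (n : Int) (h : 2 ≤ n) :
    InvTable ((PySem.List.pyRange 2 n).foldl
      (fun rev k => ((scan_min rev k).1.getD 0) :: rev) [1]) n := by
  induction n, h using Int.le_induction with
  | base =>
      intro i h1 h2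
      have : i = 1 := by omega
      subst this
      simp [show PySem.List.pyRange 2 2 = ([] : List Int) from by decide,
        PySem.List.pyGetD, minimum_M_le 1 (by omega)]
  | succ n hn ih =>
      have hrange : PySem.List.pyRange 2 (n + 1) = PySem.List.pyRange 2 n ++ [n] :=
        PySem.List.pyRange_one_succ_right hn
      set rev := (PySem.List.pyRange 2 n).foldl
        (fun rev k => ((scan_min rev k).1.getD 0) :: rev) [1] with hrev
      have hstep : (PySem.List.pyRange 2 (n + 1)).foldl
          (fun rev k => ((scan_min rev k).1.getD 0) :: rev) [1]
          = ((scan_min rev n).1.getD 0) :: rev := by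
        rw [hrange, List.foldl_append]; rfl
      obtain ⟨m, j, hmin, _, hstate⟩ := scan_min_spec rev n hn
      have hhead : (scan_min rev n).1.getD 0 = minimum_M n := by
        rw [hstate]
        simp only [Option.getD_some]
        rw [minimum_M_gt n (by omega), ← candsOf_eq rev n ih, hmin]
        rfl
      rw [hstep, hhead]
      intro i h1 h2
      by_cases hi1 : i = 1
      · subst hi1
        simp [PySem.List.pyGetD]
      · have h1' : (2 : Int) ≤ i := by omega
        have hpos : (0 : Int) ≤ i - 1 := by omega
        rw [PySem.List.pyGetD_of_nonneg _ _ hpos]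
        have htn : (i - 1).toNat = (i - 1 - 1).toNat + 1 := by omega
        rw [htn, List.getD_cons_succ]
        have := ih (i - 1) (by omega) (by omega)
        rw [PySem.List.pyGetD_of_nonneg _ _ (by omega : (0:Int) ≤ i - 1 - 1)] at this
        rw [this]
        congr 1
        omega

-- ===== VERDICT (by name: the statement is the Claim_ definition above) =====
theorem index_of_M_spec : Claim_equal_index_of_M := by
  intro n _ _
  show index_of_M n = index_of_M_alt n
  by_cases h : n > 1
  · have hn2 : (2 : Int) ≤ n := by omega
    set rev := (PySem.List.pyRange 2 n).foldl
      (fun rev k => ((scan_min rev k).1.getD 0) :: rev) [1] with hrev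
    obtain ⟨m, j, hmin, hidx, hstate⟩ := scan_min_spec rev n hn2
    have hceq := candsOf_eq rev n (table_inv n hn2)
    rw [index_of_M, index_of_M_alt, if_pos h, if_neg (by omega : ¬ n ≤ 1)]
    simp only [← hrev, hstate]
    rw [← hceq, hmin]
    simp only [Option.getD_some]
    rw [hidx]
  · rw [index_of_M, index_of_M_alt, if_neg h, if_pos (by omega : n ≤ 1)]
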